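-- pv_equiv track=rewrite | github.com/krell/tg-elysium-xiii | tools/mapmerge/map_helpers.py | key_compare
-- ===== SOURCE A (Python) =====
-- def key_compare(keyA, keyB): #thanks byond for not respecting ascii
--     pos = 0
--     for a in keyA:
--         pos += 1
--         count = pos
--         for b in keyB:
--             if(count > 1):
--                 count -= 1
--                 continue
--             if a.islower() and b.islower():
--                 if(a < b):
--                     return -1
--                 if(a > b):
--                     return 1
--                 break
--             if a.islower() and b.isupper():
--                 return -1
--             if a.isupper() and b.islower():
--                 return 1
--             if a.isupper() and b.isupper():
--                 if(a < b):
--                     return -1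
--                 if(a > b):
--                     return 1
--                 break
--     return 0
-- ===== SOURCE B (Python) =====
-- def key_compare(keyA, keyB):
--     # Two-pointer scan: j is the first index >= i holding a letter in keyB,
--     # advanced monotonically, so the nested skip-counting loop of A disappears.
--     n = len(keyB)
--     j = 0
--     for i, a in enumerate(keyA):
--         if not (a.islower() or a.isupper()):
--             continue
--         if j < i:
--             j = i
--         while j < n and not (keyB[j].islower() or keyB[j].isupper()):
--             j += 1
--         if j >= n:
--             break
--         b = keyB[j]
--         if a.islower() and b.isupper():
--             return -1
--         if a.isupper() and b.islower():
--             return 1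
--         if a < b:
--             return -1
--         if a > b:
--             return 1
--     return 0
-- ===== Notes on version B (the rewrite author's own statement) =====
-- stated objective: faster
-- what changed: A restarts a skip-counting scan of keyB from its beginning for every character of keyA; B keeps one monotone pointer j into keyB that only moves forward (skipping non-letters once), removing the nested re-scan.
import Mathlib
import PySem

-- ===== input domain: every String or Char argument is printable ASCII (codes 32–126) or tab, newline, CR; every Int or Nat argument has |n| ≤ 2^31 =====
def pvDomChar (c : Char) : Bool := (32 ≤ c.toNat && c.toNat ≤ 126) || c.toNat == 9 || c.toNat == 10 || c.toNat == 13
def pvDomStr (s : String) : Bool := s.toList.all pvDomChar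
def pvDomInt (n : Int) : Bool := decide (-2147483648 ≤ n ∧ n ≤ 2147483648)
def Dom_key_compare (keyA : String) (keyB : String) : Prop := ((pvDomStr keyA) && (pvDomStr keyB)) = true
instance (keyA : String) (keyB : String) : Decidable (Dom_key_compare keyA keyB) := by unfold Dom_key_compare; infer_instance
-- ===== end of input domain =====

-- B replaces A's quadratic skip-counting inner loop by a monotone two-pointer scan (objective: faster).

-- ===== PORT A =====
-- inner `for b in keyB` loop; `some r` = early `return r`, `none` = break / loop exhausted
def pvInnerA (a : Char) : Nat → List Char → Option Int
  | _, [] => none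
  | count, b :: rest =>
    if count > 1 then pvInnerA a (count - 1) rest
    else if PySem.Chars.islower a && PySem.Chars.islower b then
      (if a < b then some (-1) else if a > b then some 1 else none)
    else if PySem.Chars.islower a && PySem.Chars.isupper b then some (-1)
    else if PySem.Chars.isupper a && PySem.Chars.islower b then some 1
    else if PySem.Chars.isupper a && PySem.Chars.isupper b then
      (if a < b then some (-1) else if a > b then some 1 else none)
    else pvInnerA a count rest

-- outer `for a in keyA` loop, carrying `pos`
def pvOuterA (bs : List Char) : Nat → List Char → Int
  | _, [] => 0
  | pos, a :: rest =>
    match pvInnerA a (pos + 1) bs with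
    | some r => r
    | none => pvOuterA bs (pos + 1) rest

def key_compare (keyA : String) (keyB : String) : Int :=
  pvOuterA keyB.toList 0 keyA.toList

-- ===== PORT B =====
def pvLetter (c : Char) : Bool := PySem.Chars.islower c || PySem.Chars.isupper c

-- the `while j < n and not letter(keyB[j])` loop
def pvAdvance (bs : List Char) (n : Nat) (j : Nat) : Nat :=
  if h : j < n then
    if pvLetter (bs.getD j ' ') then j else pvAdvance bs n (j + 1)
  else j
  termination_by n - j

-- the `for i, a in enumerate(keyA)` loop, carrying i and the pointer j
def pvOuterB (bs : List Char) (n : Nat) : Nat → Nat → List Char → Int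
  | _, _, [] => 0
  | i, j, a :: rest =>
    if !(pvLetter a) then pvOuterB bs n (i + 1) j rest
    else
      let j1 := if j < i then i else j
      let j2 := pvAdvance bs n j1
      if j2 ≥ n then 0
      else
        let b := bs.getD j2 ' '
        if PySem.Chars.islower a && PySem.Chars.isupper b then -1
        else if PySem.Chars.isupper a && PySem.Chars.islower b then 1
        else if a < b then -1
        else if a > b then 1
        else pvOuterB bs n (i + 1) j2 rest

def key_compare_alt (keyA : String) (keyB : String) : Int :=
  pvOuterB keyB.toList keyB.toList.length 0 0 keyA.toList

-- ===== PRECONDITION & SPEC =====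
def Spec_key_compare (keyA : String) (keyB : String) (out : Int) : Prop := out = key_compare_alt keyA keyB
instance (keyA : String) (keyB : String) (out : Int) : Decidable (Spec_key_compare keyA keyB out) := by unfold Spec_key_compare; infer_instance

-- ===== CLAIM (what is proved, stated in full; the proofs are below) =====
def Claim_equal_key_compare : Prop := ∀ (keyA : String) (keyB : String), Dom_key_compare keyA keyB → Spec_key_compare keyA keyB (key_compare keyA keyB)

-- ===== LEMMAS AND PROOFS =====

-- a char is not both lower- and upper-case
lemma pv_lower_not_upper (c : Char) (h : PySem.Chars.islower c = true) :
    PySem.Chars.isupper c = false := by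
  simp [PySem.Chars.islower, PySem.Chars.isupper, Char.le_def, UInt32.le_iff_toNat_le] at *
  intro h2
  omega

lemma pv_upper_not_lower (c : Char) (h : PySem.Chars.isupper c = true) :
    PySem.Chars.islower c = false := by
  simp [PySem.Chars.islower, PySem.Chars.isupper, Char.le_def, UInt32.le_iff_toNat_le] at *
  intro h2
  omega

-- skipping `count-1` characters = dropping them up front
lemma pvInnerA_skip (a : Char) (c : Nat) (bs : List Char) :
    pvInnerA a (c + 1) bs = pvInnerA a 1 (bs.drop c) := by
  induction c generalizing bs with
  | zero => simp
  | succ c ih =>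
    cases bs with
    | nil => simp [pvInnerA.eq_def]
    | cons b rest =>
      rw [show c + 1 + 1 = (c + 1) + 1 from rfl]
      rw [pvInnerA]
      simp [ih rest]

-- a non-letter `a` never produces a decision
lemma pvInnerA_nonletter (a : Char) (ha : pvLetter a = false) (l : List Char) :
    pvInnerA a 1 l = none := by
  simp [pvLetter] at ha
  induction l with
  | nil => rfl
  | cons b rest ih => simp [pvInnerA, ha.1, ha.2, ih]

-- a list without letters never produces a decision
lemma pvInnerA_no_letter (a : Char) (l : List Char) (hl : ∀ b ∈ l, pvLetter b = false) :
    pvInnerA a 1 l = none := by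
  induction l with
  | nil => rfl
  | cons b rest ih =>
    have hb := hl b (by simp)
    simp [pvLetter] at hb
    simp [pvInnerA, hb.1, hb.2, ih (fun x hx => hl x (by simp [hx]))]

-- pvAdvance: bounds, skipped chars are non-letters, stops on a letter
lemma pvAdvance_spec (bs : List Char) (n j : Nat) :
    j ≤ pvAdvance bs n j ∧ pvAdvance bs n j ≤ max j n ∧
    (∀ k, j ≤ k → k < pvAdvance bs n j → pvLetter (bs.getD k ' ') = false) ∧
    (pvAdvance bs n j < n → pvLetter (bs.getD (pvAdvance bs n j) ' ') = true) := by
  fun_induction pvAdvance bs n j with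
  | case1 j h hl => exact ⟨le_refl _, by omega, by omega, fun _ => hl⟩
  | case2 j h hl ih =>
    obtain ⟨h1, h2, h3, h4⟩ := ih
    refine ⟨by omega, by omega, ?_, h4⟩
    intro k hk1 hk2
    rcases Nat.eq_or_lt_of_le hk1 with rfl | hk
    · simpa using hl
    · exact h3 k hk hk2
  | case3 j h => exact ⟨le_refl _, by omega, by omega, by omega⟩

-- advancing from i equals advancing from j1 ≥ i when [i, j1) holds no letters
lemma pvAdvance_shift (bs : List Char) (n i j1 : Nat) (hij : i ≤ j1) (hj1 : j1 ≤ n)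
    (hnl : ∀ k, i ≤ k → k < j1 → pvLetter (bs.getD k ' ') = false) :
    pvAdvance bs n i = pvAdvance bs n j1 := by
  obtain ⟨d, rfl⟩ : ∃ d, j1 = i + d := ⟨j1 - i, by omega⟩
  clear hij
  induction d generalizing i with
  | zero => rfl
  | succ d ih =>
    have hi : i < n := by omega
    have hni : pvLetter (bs.getD i ' ') = false := hnl i (le_refl _) (by omega)
    rw [pvAdvance.eq_def]
    simp only [hi, hni, dif_pos, Bool.false_eq_true, if_false]
    have := ih (i + 1) (by omega) (fun k hk1 hk2 => hnl k (by omega) (by omega))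
    rw [this]
    congr 1
    omega

-- the scan from position j, expressed through pvAdvance
lemma pvInnerA_eq_advance (a : Char) (ha : pvLetter a = true) (bs : List Char) (j : Nat) :
    pvInnerA a 1 (bs.drop j) =
      (if _h : pvAdvance bs bs.length j < bs.length then
        (let b := bs.getD (pvAdvance bs bs.length j) ' '
         if PySem.Chars.islower a && PySem.Chars.islower b then
           (if a < b then some (-1) else if a > b then some 1 else none)
         else if PySem.Chars.islower a && PySem.Chars.isupper b then some (-1)
         else if PySem.Chars.isupper a && PySem.Chars.islower b then some 1
         else (if a < b then some (-1) else if a > b then some 1 else none))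
       else none) := by
  fun_induction pvAdvance bs bs.length j with
  | case1 j h hl =>
    rw [List.drop_eq_getElem_cons h]
    have hb : bs.getD j ' ' = bs[j] := List.getD_eq_getElem bs ' ' h
    rw [hb] at hl
    simp only [h, dif_pos, hb]
    have hbl := hl
    simp [pvLetter] at ha hbl
    rcases ha with haL | haU
    · have haU := pv_lower_not_upper a haL
      rcases hbl with hbL | hbU
      · have hbU := pv_lower_not_upper _ hbL
        simp [pvInnerA, haL, hbL]
      · simp [pvInnerA, haL, hbU]
    · have haL : PySem.Chars.islower a = false := by
        by_contra hc
        simp [pv_lower_not_upper a (by simpa using hc)] at haU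
      rcases hbl with hbL | hbU
      · have hbU := pv_lower_not_upper _ hbL
        simp [pvInnerA, haL, haU, hbL, hbU]
      · have hbL : PySem.Chars.islower (bs[j]) = false := by
          by_contra hc
          simp [pv_lower_not_upper _ (by simpa using hc)] at hbU
        simp [pvInnerA, haL, haU, hbL, hbU]
  | case2 j h hl ih =>
    rw [List.drop_eq_getElem_cons h]
    have hb : bs.getD j ' ' = bs[j] := List.getD_eq_getElem bs ' ' h
    rw [hb] at hl
    simp only [pvLetter, Bool.or_eq_true, not_or, Bool.not_eq_true] at hl
    obtain ⟨hbL, hbU⟩ := hl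
    rw [pvInnerA]
    simp only [hbL, hbU, Bool.and_false, Bool.false_eq_true, if_false]
    simpa using ih
  | case3 j h =>
    have hd : bs.drop j = [] := List.drop_eq_nil_of_le (by omega)
    rw [hd]
    simp only [h, dif_neg, not_false_iff]
    rfl

-- if keyB holds no letters from position i on, A returns 0
lemma pvOuterA_zero (bs : List Char) (as : List Char) (i : Nat)
    (h : ∀ k, i ≤ k → pvLetter (bs.getD k ' ') = false ∨ bs.length ≤ k) :
    pvOuterA bs i as = 0 := by
  induction as generalizing i with
  | nil => rfl
  | cons a rest ih =>
    have hnl : ∀ b ∈ bs.drop i, pvLetter b = false := by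
      intro b hb
      obtain ⟨m, hm, rfl⟩ := List.mem_iff_getElem.mp hb
      rw [List.getElem_drop]
      have hlen : i + m < bs.length := by
        have := bs.length_drop (i := i); omega
      rcases h (i + m) (by omega) with h1 | h1
      · rwa [List.getD_eq_getElem bs ' ' hlen] at h1
      · omega
    have hz : pvInnerA a (i + 1) bs = none := by
      rw [pvInnerA_skip, pvInnerA_no_letter a _ hnl]
    simp [pvOuterA, hz]
    exact ih (i + 1) (fun k hk => h k (by omega))

-- main loop invariant: the pointer j only hides non-letter positions
lemma pv_main (bs : List Char) (as : List Char) (i j : Nat)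
    (hjb : j ≤ max i bs.length)
    (hinv : ∀ k, i ≤ k → k < j → pvLetter (bs.getD k ' ') = false) :
    pvOuterA bs i as = pvOuterB bs bs.length i j as := by
  induction as generalizing i j with
  | nil => rfl
  | cons a rest ih =>
    rw [pvOuterA, pvOuterB]
    by_cases ha : pvLetter a = true
    · simp only [ha, Bool.not_true, Bool.false_eq_true, if_false]
      set j1 := if j < i then i else j with hj1def
      have hij1 : i ≤ j1 := by rw [hj1def]; split <;> omega
      have hnl1 : ∀ k, i ≤ k → k < j1 → pvLetter (bs.getD k ' ') = false := by
        intro k hk1 hk2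
        rw [hj1def] at hk2
        split at hk2
        · omega
        · exact hinv k hk1 hk2
      by_cases hle : j1 ≤ bs.length
      · have hshift : pvAdvance bs bs.length i = pvAdvance bs bs.length j1 :=
          pvAdvance_shift bs bs.length i j1 hij1 hle hnl1
        have hscan := pvInnerA_eq_advance a ha bs i
        rw [hshift] at hscan
        set j2 := pvAdvance bs bs.length j1 with hj2def
        obtain ⟨ha1, ha2, ha3, ha4⟩ := pvAdvance_spec bs bs.length j1
        rw [pvInnerA_skip, hscan]
        by_cases hj2 : j2 < bs.length
        · simp only [hj2, dif_pos]
          simp only [show ¬ (j2 ≥ bs.length) from by omega, if_false]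
          set b := bs.getD j2 ' ' with hbdef
          have hrec : pvOuterA bs (i + 1) rest = pvOuterB bs bs.length (i + 1) j2 rest := by
            refine ih (i + 1) j2 (by omega) ?_
            intro k hk1 hk2
            rcases Nat.lt_or_ge k j1 with hk | hk
            · exact hnl1 k (by omega) hk
            · exact ha3 k hk hk2
          have hbl : pvLetter b = true := ha4 hj2
          simp only [pvLetter, Bool.or_eq_true] at ha hbl
          rcases ha with haL | haU
          · have haU := pv_lower_not_upper a haL
            rcases hbl with hbL | hbU
            · have hbU := pv_lower_not_upper _ hbL
              simp only [haL, hbL, hbU, Bool.and_true, Bool.and_false,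
                Bool.false_eq_true, if_false, if_true]
              by_cases hab : a < b
              · simp [hab, haU]
              · by_cases hba : a > b
                · simp [hab, hba, haU]
                · simp [hab, hba, haU, hrec]
            · have hbL := pv_upper_not_lower _ hbU
              simp [haL, hbL, hbU]
          · have haL : PySem.Chars.islower a = false := pv_upper_not_lower a haU
            rcases hbl with hbL | hbU
            · have hbU := pv_lower_not_upper _ hbL
              simp [haL, haU, hbL, hbU]
            · have hbL := pv_upper_not_lower _ hbU
              simp only [haL, haU, hbL, hbU, Bool.and_true, Bool.and_false,
                Bool.false_eq_true, if_false]
              by_cases hab : a < b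
              · simp [hab]
              · by_cases hba : a > b
                · simp [hab, hba]
                · simp [hab, hba, hrec]
        · simp only [hj2, dif_neg, not_false_iff]
          simp only [show j2 ≥ bs.length from by omega, if_true]
          show pvOuterA bs (i + 1) rest = 0
          refine pvOuterA_zero bs rest (i + 1) ?_
          intro k hk
          rcases Nat.lt_or_ge k bs.length with hklen | hklen
          · left
            rcases Nat.lt_or_ge k j1 with hk1 | hk1
            · exact hnl1 k (by omega) hk1
            · exact ha3 k hk1 (by omega)
          · right; omega
      · -- j1 > bs.length: keyB is exhausted for good (i is past its end)
        have hadv : pvAdvance bs bs.length j1 = j1 := by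
          rw [pvAdvance.eq_def]; simp [show ¬ j1 < bs.length from by omega]
        rw [hadv]
        simp only [show j1 ≥ bs.length from by omega, if_true]
        have hi : bs.length ≤ i := by
          rw [hj1def] at hle; split at hle <;> omega
        rw [pvInnerA_skip]
        have hd : bs.drop i = [] := List.drop_eq_nil_of_le (by omega)
        rw [hd]
        show pvOuterA bs (i + 1) rest = 0
        refine pvOuterA_zero bs rest (i + 1) ?_
        intro k hk
        right; omega
    · simp only [Bool.not_eq_true] at ha
      simp only [ha, Bool.not_false, if_true]
      have hz : pvInnerA a (i + 1) bs = none := by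
        rw [pvInnerA_skip]
        exact pvInnerA_nonletter a ha _
      rw [hz]
      exact ih (i + 1) j (by omega) (fun k hk1 hk2 => hinv k (by omega) hk2)

-- ===== VERDICT (by name: the statement is the Claim_ definition above) =====
theorem key_compare_spec : Claim_equal_key_compare := by
  intro keyA keyB _
  unfold Spec_key_compare key_compare key_compare_alt
  exact pv_main _ _ 0 0 (by omega) (by omega)
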